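-- pv_equiv track=rewrite | github.com/SreenandanS/Symba_Eval_2026 | Specific Task 2.1/custom_qed_fd2sq/tokenizer.py | _collapse_numeric_tokens
-- ===== SOURCE A (Python) =====
-- from typing import Dict, List, Optional, Sequence, Union
--
-- NUM_START = "[NUM_START]"
--
-- NUM_END = "[NUM_END]"
--
-- DIGIT_TOKENS: tuple[str, ...] = tuple(f"[DIGIT_{digit}]" for digit in range(10))
--
-- def _collapse_numeric_tokens(tokens: Sequence[str]) -> List[str]:
--     collapsed: list[str] = []
--     index = 0
--     while index < len(tokens):
--         token = tokens[index]
--         if token != NUM_START: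
--             collapsed.append(token)
--             index += 1
--             continue
--         index += 1
--         digits: list[str] = []
--         while index < len(tokens) and tokens[index] in DIGIT_TOKENS:
--             digits.append(tokens[index][7:-1])
--             index += 1
--         if index >= len(tokens) or tokens[index] != NUM_END:
--             collapsed.append("<INVALID_NUM>")
--             break
--         collapsed.append("".join(digits) if digits else "<INVALID_NUM>")
--         index += 1
--     return collapsed
-- ===== SOURCE B (Python) =====
-- from typing import Dict, List, Optional, Sequence, Union
--
-- NUM_START = "[NUM_START]"
--
-- NUM_END = "[NUM_END]"
--
-- DIGIT_TOKENS: tuple[str, ...] = tuple(f"[DIGIT_{digit}]" for digit in range(10))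
--
-- DIGIT_SET = set(DIGIT_TOKENS)
--
-- def _collapse_numeric_tokens(tokens: Sequence[str]) -> List[str]:
--     # Group-oriented scan: bulk-copy the segments between number groups with
--     # index()/extend(), instead of A's per-token outer while loop.
--     toks = list(tokens)
--     n = len(toks)
--     out: List[str] = []
--     pos = 0
--     while True:
--         try:
--             start = toks.index(NUM_START, pos)
--         except ValueError:
--             out.extend(toks[pos:])
--             return out
--         out.extend(toks[pos:start])
--         stop = start + 1
--         while stop < n and toks[stop] in DIGIT_SET:
--             stop += 1
--         if stop == n or toks[stop] != NUM_END:
--             out.append("<INVALID_NUM>")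
--             return out
--         out.append(
--             "".join(t[7:-1] for t in toks[start + 1:stop])
--             if stop > start + 1
--             else "<INVALID_NUM>"
--         )
--         pos = stop + 1
-- ===== Notes on version B (the rewrite author's own statement) =====
-- stated objective: alternative
-- what changed: Replaced A's per-token outer while loop (explicit index, append one token per iteration) with a group-oriented scan that uses list.index() to find the next [NUM_START], bulk-copies the whole preceding segment with extend()/slicing, and joins the digit run from a slice instead of an accumulator list.
import Mathlib
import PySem

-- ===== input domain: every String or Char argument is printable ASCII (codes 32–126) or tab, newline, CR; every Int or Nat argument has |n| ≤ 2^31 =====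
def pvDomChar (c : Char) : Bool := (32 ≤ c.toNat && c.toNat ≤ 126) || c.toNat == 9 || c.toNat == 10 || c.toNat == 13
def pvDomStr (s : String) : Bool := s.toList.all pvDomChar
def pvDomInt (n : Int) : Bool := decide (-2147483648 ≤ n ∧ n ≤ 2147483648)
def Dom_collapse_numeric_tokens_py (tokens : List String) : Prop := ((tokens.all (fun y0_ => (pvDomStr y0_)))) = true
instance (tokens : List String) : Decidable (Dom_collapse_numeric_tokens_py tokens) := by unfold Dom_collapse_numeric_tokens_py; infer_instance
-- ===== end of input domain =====

-- B rewrites A's per-token outer while loop as a group-oriented scan (find the next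
-- NUM_START, bulk-copy the segment before it, then handle one number group); same
-- return value everywhere (objective: alternative decomposition, no speed claim).
-- Both loops advance an index that strictly increases, so each port carries a
-- structural fuel argument (tokens.length + 1 at the top level) as a totality guard;
-- the fuel never runs out on the actual calls (pvLoop_eq is proved for every
-- sufficient fuel).

-- ===== PORT A =====
def pvNUM_START : String := "[NUM_START]"
def pvNUM_END : String := "[NUM_END]"
def pvDIGIT_TOKENS : List String :=
  (PySem.List.pyRange 0 10 1).map (fun d => "[DIGIT_" ++ PySem.Int.toStr d ++ "]")
-- t[7:-1] (the same Python expression occurs in A and in B)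
def pvStripDigit (t : String) : String := PySem.Str.slice t (some 7) (some (-1))

-- A's inner while: collect stripped digit tokens, return them with the final index
def pvAScan (toks : List String) (fuel index : Nat) (digits : List String) : List String × Nat :=
  match fuel with
  | 0 => (digits, index)
  | fuel + 1 =>
    if _h : index < toks.length then
      if toks[index] ∈ pvDIGIT_TOKENS then
        pvAScan toks fuel (index + 1) (digits ++ [pvStripDigit toks[index]])
      else (digits, index)
    else (digits, index)

-- A's outer while: one token per iteration, explicit index
def pvALoop (toks : List String) (fuel : Nat) (collapsed : List String) (index : Nat) : List String :=
  match fuel with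
  | 0 => collapsed
  | fuel + 1 =>
    if _h : index < toks.length then
      if toks[index] ≠ pvNUM_START then
        pvALoop toks fuel (collapsed ++ [toks[index]]) (index + 1)
      else
        -- index += 1; inner digit while
        if h2 : (pvAScan toks fuel (index + 1) []).2 < toks.length then
          if toks[(pvAScan toks fuel (index + 1) []).2] ≠ pvNUM_END then
            collapsed ++ ["<INVALID_NUM>"]   -- break
          else
            pvALoop toks fuel
              (collapsed ++ [if (pvAScan toks fuel (index + 1) []).1 = [] then "<INVALID_NUM>"
                             else PySem.Str.join "" (pvAScan toks fuel (index + 1) []).1])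
              ((pvAScan toks fuel (index + 1) []).2 + 1)
        else collapsed ++ ["<INVALID_NUM>"]  -- break (ran off the end)
    else collapsed

def collapse_numeric_tokens_py (tokens : List String) : List String :=
  pvALoop tokens (tokens.length + 1) [] 0

-- ===== PORT B =====
def pvDIGIT_SET : PySem.Set String := PySem.Set.ofList pvDIGIT_TOKENS

-- B's digit-run scan: only advances the index
def pvBScan (toks : List String) (fuel stop : Nat) : Nat :=
  match fuel with
  | 0 => stop
  | fuel + 1 =>
    if _h : stop < toks.length then
      if PySem.Set.contains pvDIGIT_SET toks[stop] then pvBScan toks fuel (stop + 1) else stop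
    else stop

-- B's outer loop: find the next NUM_START from pos, bulk-copy the segment before it
def pvBLoop (toks : List String) (fuel : Nat) (out : List String) (pos : Nat) : List String :=
  match fuel with
  | 0 => out
  | fuel + 1 =>
    match PySem.List.index? (PySem.List.slice toks (some (pos : Int)) none) pvNUM_START with
    | none => out ++ PySem.List.slice toks (some (pos : Int)) none
    | some k =>
      if _h : pvBScan toks fuel (pos + k + 1) < toks.length then
        if toks[pvBScan toks fuel (pos + k + 1)] = pvNUM_END then
          pvBLoop toks fuel
            ((out ++ PySem.List.slice toks (some (pos : Int)) (some ((pos + k : Nat) : Int))) ++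
              [if pos + k + 1 < pvBScan toks fuel (pos + k + 1) then
                 PySem.Str.join ""
                   ((PySem.List.slice toks (some ((pos + k + 1 : Nat) : Int))
                       (some ((pvBScan toks fuel (pos + k + 1) : Nat) : Int))).map pvStripDigit)
               else "<INVALID_NUM>"])
            (pvBScan toks fuel (pos + k + 1) + 1)
        else
          (out ++ PySem.List.slice toks (some (pos : Int)) (some ((pos + k : Nat) : Int))) ++
            ["<INVALID_NUM>"]
      else
        (out ++ PySem.List.slice toks (some (pos : Int)) (some ((pos + k : Nat) : Int))) ++
          ["<INVALID_NUM>"]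

def collapse_numeric_tokens_py_alt (tokens : List String) : List String :=
  pvBLoop tokens (tokens.length + 1) [] 0

-- ===== PRECONDITION & SPEC =====
def Spec_collapse_numeric_tokens_py (tokens : List String) (out : List String) : Prop := out = collapse_numeric_tokens_py_alt tokens
instance (tokens : List String) (out : List String) : Decidable (Spec_collapse_numeric_tokens_py tokens out) := by unfold Spec_collapse_numeric_tokens_py; infer_instance

-- ===== CLAIM (what is proved, stated in full; the proofs are below) =====
def Claim_equal_collapse_numeric_tokens_py : Prop := ∀ (tokens : List String), Dom_collapse_numeric_tokens_py tokens → Spec_collapse_numeric_tokens_py tokens (collapse_numeric_tokens_py tokens)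

-- ===== LEMMAS AND PROOFS =====

-- one-step unfoldings (definitional)
theorem pvAScan_succ (toks : List String) (fuel index : Nat) (digits : List String) :
    pvAScan toks (fuel + 1) index digits =
      if _h : index < toks.length then
        if toks[index] ∈ pvDIGIT_TOKENS then
          pvAScan toks fuel (index + 1) (digits ++ [pvStripDigit toks[index]])
        else (digits, index)
      else (digits, index) := rfl

theorem pvBScan_succ (toks : List String) (fuel stop : Nat) :
    pvBScan toks (fuel + 1) stop =
      if _h : stop < toks.length then
        if PySem.Set.contains pvDIGIT_SET toks[stop] then pvBScan toks fuel (stop + 1) else stop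
      else stop := rfl

theorem pvALoop_succ (toks : List String) (fuel : Nat) (collapsed : List String) (index : Nat) :
    pvALoop toks (fuel + 1) collapsed index =
      if _h : index < toks.length then
        if toks[index] ≠ pvNUM_START then
          pvALoop toks fuel (collapsed ++ [toks[index]]) (index + 1)
        else
          if h2 : (pvAScan toks fuel (index + 1) []).2 < toks.length then
            if toks[(pvAScan toks fuel (index + 1) []).2] ≠ pvNUM_END then
              collapsed ++ ["<INVALID_NUM>"]
            else
              pvALoop toks fuel
                (collapsed ++ [if (pvAScan toks fuel (index + 1) []).1 = [] then "<INVALID_NUM>"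
                               else PySem.Str.join "" (pvAScan toks fuel (index + 1) []).1])
                ((pvAScan toks fuel (index + 1) []).2 + 1)
          else collapsed ++ ["<INVALID_NUM>"]
      else collapsed := rfl

theorem pvBLoop_succ (toks : List String) (fuel : Nat) (out : List String) (pos : Nat) :
    pvBLoop toks (fuel + 1) out pos =
      match PySem.List.index? (PySem.List.slice toks (some (pos : Int)) none) pvNUM_START with
      | none => out ++ PySem.List.slice toks (some (pos : Int)) none
      | some k =>
        if _h : pvBScan toks fuel (pos + k + 1) < toks.length then
          if toks[pvBScan toks fuel (pos + k + 1)] = pvNUM_END then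
            pvBLoop toks fuel
              ((out ++ PySem.List.slice toks (some (pos : Int)) (some ((pos + k : Nat) : Int))) ++
                [if pos + k + 1 < pvBScan toks fuel (pos + k + 1) then
                   PySem.Str.join ""
                     ((PySem.List.slice toks (some ((pos + k + 1 : Nat) : Int))
                         (some ((pvBScan toks fuel (pos + k + 1) : Nat) : Int))).map pvStripDigit)
                 else "<INVALID_NUM>"])
              (pvBScan toks fuel (pos + k + 1) + 1)
          else
            (out ++ PySem.List.slice toks (some (pos : Int)) (some ((pos + k : Nat) : Int))) ++
              ["<INVALID_NUM>"]
        else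
          (out ++ PySem.List.slice toks (some (pos : Int)) (some ((pos + k : Nat) : Int))) ++
            ["<INVALID_NUM>"] := rfl

theorem pvBScan_ge (toks : List String) :
    ∀ (fuel i : Nat), i ≤ pvBScan toks fuel i := by
  intro fuel
  induction fuel with
  | zero => intro i; exact le_rfl
  | succ fuel ih =>
    intro i
    rw [pvBScan_succ]
    split_ifs with h hmem
    · exact le_trans (Nat.le_succ i) (ih (i + 1))
    · exact le_rfl
    · exact le_rfl

theorem pvBScan_le (toks : List String) :
    ∀ (fuel i : Nat), i ≤ toks.length → pvBScan toks fuel i ≤ toks.length := by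
  intro fuel
  induction fuel with
  | zero => intro i hi; exact hi
  | succ fuel ih =>
    intro i hi
    rw [pvBScan_succ]
    split_ifs with h hmem
    · exact ih (i + 1) (by omega)
    · exact hi
    · exact hi

theorem pvBScan_stop (toks : List String) (fuel i : Nat) (h : ¬ i < toks.length) :
    pvBScan toks fuel i = i := by
  cases fuel with
  | zero => rfl
  | succ fuel => rw [pvBScan_succ]; simp [h]

theorem pvBScan_irrel (toks : List String) :
    ∀ (f1 f2 i : Nat), toks.length - i ≤ f1 → toks.length - i ≤ f2 →
      pvBScan toks f1 i = pvBScan toks f2 i := by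
  intro f1
  induction f1 with
  | zero =>
    intro f2 i h1 h2
    rw [pvBScan_stop toks 0 i (by omega), pvBScan_stop toks f2 i (by omega)]
  | succ f1 ih =>
    intro f2 i h1 h2
    by_cases h : i < toks.length
    · cases f2 with
      | zero => omega
      | succ g =>
        rw [pvBScan_succ, pvBScan_succ]
        split_ifs with hmem
        · exact ih g (i + 1) (by omega) (by omega)
        · rfl
    · rw [pvBScan_stop toks _ i h, pvBScan_stop toks _ i h]

-- A's digit scan computes (map strip of the digit-run slice, B's scan index), fuel for fuel
theorem pvScan_eq (toks : List String) :
    ∀ (fuel i : Nat) (ds : List String),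
      pvAScan toks fuel i ds =
        (ds ++ (PySem.List.slice toks (some (i : Int))
                  (some ((pvBScan toks fuel i : Nat) : Int))).map pvStripDigit,
         pvBScan toks fuel i) := by
  intro fuel
  induction fuel with
  | zero =>
    intro i ds
    simp [pvAScan, pvBScan, PySem.List.slice_natCast]
  | succ fuel ih =>
    intro i ds
    rw [pvAScan_succ, pvBScan_succ]
    by_cases h : i < toks.length
    · by_cases hmem : toks[i] ∈ pvDIGIT_TOKENS
      · have hmem' : PySem.Set.contains pvDIGIT_SET toks[i] = true := by
          simpa [pvDIGIT_SET, PySem.Set.contains] using hmem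
        have hge : i + 1 ≤ pvBScan toks fuel (i + 1) := pvBScan_ge toks fuel (i + 1)
        rw [dif_pos h, dif_pos h, if_pos hmem, hmem', if_pos rfl, ih]
        simp only [Prod.mk.injEq]
        refine ⟨?_, trivial⟩
        rw [PySem.List.slice_natCast, PySem.List.slice_natCast,
          List.drop_eq_getElem_cons h]
        have harith : pvBScan toks fuel (i + 1) - i = (pvBScan toks fuel (i + 1) - (i + 1)) + 1 := by
          omega
        rw [harith, List.take_succ_cons]
        simp
      · have hmem' : PySem.Set.contains pvDIGIT_SET toks[i] = false := by
          simp [pvDIGIT_SET, PySem.Set.contains, hmem]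
        rw [dif_pos h, dif_pos h, if_neg hmem, hmem']
        simp [PySem.List.slice_natCast]
    · rw [dif_neg h, dif_neg h]
      simp [PySem.List.slice_natCast]

theorem pvBLoop_stop (toks : List String) (fuel : Nat) (out : List String) (pos : Nat)
    (h : ¬ pos < toks.length) : pvBLoop toks fuel out pos = out := by
  cases fuel with
  | zero => rfl
  | succ fuel =>
    rw [pvBLoop_succ]
    have hdrop : PySem.List.slice toks (some (pos : Int)) none = ([] : List String) := by
      rw [PySem.List.slice_from_natCast]; exact List.drop_eq_nil_of_le (by omega)
    rw [hdrop]
    simp [PySem.List.index?_eq_idxOf?]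

-- B's loop returns the same value for any two sufficient fuels
theorem pvBLoop_irrel (toks : List String) :
    ∀ (f1 f2 pos : Nat) (out : List String),
      toks.length - pos ≤ f1 → toks.length - pos ≤ f2 →
      pvBLoop toks f1 out pos = pvBLoop toks f2 out pos := by
  intro f1
  induction f1 with
  | zero =>
    intro f2 pos out h1 h2
    rw [pvBLoop_stop toks 0 out pos (by omega), pvBLoop_stop toks f2 out pos (by omega)]
  | succ f1 ih =>
    intro f2 pos out h1 h2
    by_cases hp : pos < toks.length
    · cases f2 with
      | zero => omega
      | succ g =>
        rw [pvBLoop_succ, pvBLoop_succ]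
        cases hidx : PySem.List.index? (PySem.List.slice toks (some (pos : Int)) none) pvNUM_START with
        | none => rfl
        | some k =>
          have hs : pvBScan toks f1 (pos + k + 1) = pvBScan toks g (pos + k + 1) :=
            pvBScan_irrel toks f1 g (pos + k + 1) (by omega) (by omega)
          have hge : pos + k + 1 ≤ pvBScan toks g (pos + k + 1) := pvBScan_ge toks g _
          simp only [hs]
          by_cases h : pvBScan toks g (pos + k + 1) < toks.length
          · rw [dif_pos h, dif_pos h]
            by_cases hend : toks[pvBScan toks g (pos + k + 1)]'h = pvNUM_END
            · rw [if_pos hend, if_pos hend]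
              exact ih g _ _ (by omega) (by omega)
            · rw [if_neg hend, if_neg hend]
          · rw [dif_neg h, dif_neg h]
    · rw [pvBLoop_stop toks _ out pos hp, pvBLoop_stop toks _ out pos hp]

-- passing one non-NUM_START token through B's bulk copy
theorem pvBLoop_pass (toks : List String) (fuel : Nat) (out : List String) (pos : Nat)
    (hp : pos < toks.length) (ht : toks[pos] ≠ pvNUM_START)
    (hf : toks.length - pos ≤ fuel + 1) :
    pvBLoop toks (fuel + 1) out pos = pvBLoop toks fuel (out ++ [toks[pos]]) (pos + 1) := by
  have hdrop : PySem.List.slice toks (some (pos : Int)) none = toks[pos] :: List.drop (pos + 1) toks := by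
    rw [PySem.List.slice_from_natCast, List.drop_eq_getElem_cons hp]
  cases fuel with
  | zero =>
    have hlen : toks.length = pos + 1 := by omega
    have hnil : List.drop (pos + 1) toks = ([] : List String) :=
      List.drop_eq_nil_of_le (by omega)
    have h0 : pvBLoop toks 0 (out ++ [toks[pos]]) (pos + 1) = out ++ [toks[pos]] := rfl
    rw [pvBLoop_succ, hdrop, PySem.List.index?_cons_of_ne _ ht, hnil, h0]
    simp [PySem.List.index?_eq_idxOf?]
  | succ g =>
    have hdrop' : PySem.List.slice toks (some ((pos + 1 : Nat) : Int)) none = List.drop (pos + 1) toks :=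
      PySem.List.slice_from_natCast toks (pos + 1)
    rw [pvBLoop_succ]
    conv_rhs => rw [pvBLoop_succ]
    rw [hdrop, hdrop', PySem.List.index?_cons_of_ne _ ht]
    cases hidx : PySem.List.index? (List.drop (pos + 1) toks) pvNUM_START with
    | none => simp [hdrop]
    | some k =>
      have hsl : PySem.List.slice toks (some (pos : Int)) (some ((pos + (k + 1) : Nat) : Int)) =
          toks[pos] :: PySem.List.slice toks (some ((pos + 1 : Nat) : Int)) (some ((pos + 1 + k : Nat) : Int)) := by
        rw [PySem.List.slice_natCast, PySem.List.slice_natCast, List.drop_eq_getElem_cons hp]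
        have h1 : pos + (k + 1) - pos = k + 1 := by omega
        have h2 : pos + 1 + k - (pos + 1) = k := by omega
        rw [h1, h2, List.take_succ_cons]
      have harith : pos + (k + 1) + 1 = pos + 1 + k + 1 := by omega
      have hs : pvBScan toks (g + 1) (pos + 1 + k + 1) = pvBScan toks g (pos + 1 + k + 1) :=
        pvBScan_irrel toks (g + 1) g (pos + 1 + k + 1) (by omega) (by omega)
      have hge : pos + 1 + k + 1 ≤ pvBScan toks g (pos + 1 + k + 1) := pvBScan_ge toks g _
      simp only [Option.map_some]
      rw [harith, hsl, hs]
      by_cases h : pvBScan toks g (pos + 1 + k + 1) < toks.length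
      · rw [dif_pos h, dif_pos h]
        by_cases hend : toks[pvBScan toks g (pos + 1 + k + 1)]'h = pvNUM_END
        · rw [if_pos hend, if_pos hend,
            pvBLoop_irrel toks (g + 1) g (pvBScan toks g (pos + 1 + k + 1) + 1) _
              (by omega) (by omega)]
          congr 1
          simp
        · rw [if_neg hend, if_neg hend]
          simp
      · rw [dif_neg h, dif_neg h]
        simp

-- the two outer loops agree, fuel for fuel, whenever the fuel is sufficient
theorem pvLoop_eq (toks : List String) :
    ∀ (fuel pos : Nat) (out : List String), toks.length - pos ≤ fuel →
      pvALoop toks fuel out pos = pvBLoop toks fuel out pos := by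
  intro fuel
  induction fuel with
  | zero => intro pos out hn; rfl
  | succ fuel ih =>
    intro pos out hn
    by_cases hp : pos < toks.length
    · by_cases ht : toks[pos] = pvNUM_START
      · -- a number group starts here
        have hdrop : PySem.List.slice toks (some (pos : Int)) none = toks[pos] :: List.drop (pos + 1) toks := by
          rw [PySem.List.slice_from_natCast, List.drop_eq_getElem_cons hp]
        have hfind : PySem.List.index? (PySem.List.slice toks (some (pos : Int)) none) pvNUM_START = some 0 := by
          rw [hdrop, ht]; exact PySem.List.index?_cons_self _ _
        have hs0 : PySem.List.slice toks (some (pos : Int)) (some ((pos : Nat) : Int)) = ([] : List String) := by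
          rw [PySem.List.slice_natCast]; simp
        have hscan := pvScan_eq toks fuel (pos + 1) []
        have hge : pos + 1 ≤ pvBScan toks fuel (pos + 1) := pvBScan_ge toks fuel (pos + 1)
        have hle : pvBScan toks fuel (pos + 1) ≤ toks.length := pvBScan_le toks fuel (pos + 1) (by omega)
        have hlen : ((PySem.List.slice toks (some ((pos + 1 : Nat) : Int))
            (some ((pvBScan toks fuel (pos + 1) : Nat) : Int))).map pvStripDigit).length =
            pvBScan toks fuel (pos + 1) - (pos + 1) := by
          rw [PySem.List.slice_natCast]
          simp; omega
        have hempty : ((PySem.List.slice toks (some ((pos + 1 : Nat) : Int))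
            (some ((pvBScan toks fuel (pos + 1) : Nat) : Int))).map pvStripDigit) = [] ↔
            ¬ pos + 1 < pvBScan toks fuel (pos + 1) := by
          rw [← List.length_eq_zero_iff, hlen]; omega
        rw [pvALoop_succ, pvBLoop_succ, hfind]
        simp only [hp, dite_true, ht, ne_eq, not_true_eq_false, if_false, hscan,
          Nat.add_zero, hs0, List.append_nil, List.nil_append]
        by_cases h2 : pvBScan toks fuel (pos + 1) < toks.length
        · simp only [h2, dite_true]
          by_cases hend : toks[pvBScan toks fuel (pos + 1)] = pvNUM_END
          · simp only [hend, not_true_eq_false, if_false, if_true]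
            have hv : (if ((PySem.List.slice toks (some ((pos + 1 : Nat) : Int))
                  (some ((pvBScan toks fuel (pos + 1) : Nat) : Int))).map pvStripDigit) = []
                 then "<INVALID_NUM>"
                 else PySem.Str.join "" ((PySem.List.slice toks (some ((pos + 1 : Nat) : Int))
                  (some ((pvBScan toks fuel (pos + 1) : Nat) : Int))).map pvStripDigit)) =
                (if pos + 1 < pvBScan toks fuel (pos + 1)
                 then PySem.Str.join "" ((PySem.List.slice toks (some ((pos + 1 : Nat) : Int))
                  (some ((pvBScan toks fuel (pos + 1) : Nat) : Int))).map pvStripDigit)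
                 else "<INVALID_NUM>") := by
              by_cases hne : pos + 1 < pvBScan toks fuel (pos + 1)
              · rw [if_neg ((not_iff_not.mpr hempty).mpr (by simpa using hne)), if_pos hne]
              · rw [if_pos (hempty.mpr hne), if_neg hne]
            rw [hv]
            exact ih (pvBScan toks fuel (pos + 1) + 1) _ (by omega)
          · simp [hend]
        · simp [h2]
      · -- pass-through token
        rw [pvALoop_succ]
        simp only [hp, dite_true, ne_eq, ht, not_false_eq_true, if_true]
        rw [ih (pos + 1) _ (by omega), pvBLoop_pass toks fuel out pos hp ht hn]
    · rw [pvALoop_succ, pvBLoop_stop toks _ out pos hp]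
      simp [hp]

-- ===== VERDICT (by name: the statement is the Claim_ definition above) =====
theorem collapse_numeric_tokens_py_spec : Claim_equal_collapse_numeric_tokens_py := by
  intro tokens _
  unfold Spec_collapse_numeric_tokens_py collapse_numeric_tokens_py collapse_numeric_tokens_py_alt
  exact pvLoop_eq tokens (tokens.length + 1) 0 [] (by omega)
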